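-- pv_equiv track=rewrite | github.com/zana-AI/zana_planner | tm_bot/llms/agent.py | _count_ping_pong
-- ===== SOURCE A (Python) =====
-- from typing import Any, Callable, Dict, List, Optional, Sequence, TypedDict
--
-- def _count_ping_pong(history: List[dict], current_signature: str) -> int:
--     signatures = [str(entry.get("signature") or "") for entry in history if entry.get("signature")]
--     signatures.append(current_signature)
--     if len(signatures) < 3:
--         return 0
--
--     a = signatures[-1]
--     b = signatures[-2]
--     if not a or not b or a == b:
--         return 0
--
--     streak = 2
--     expected = a
--     for sig in reversed(signatures[:-2]):
--         if sig != expected: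
--             break
--         streak += 1
--         expected = b if expected == a else a
--     return streak
-- ===== SOURCE B (Python) =====
-- def _count_ping_pong(history, current_signature):
--     sigs = [str(entry.get("signature") or "") for entry in history if entry.get("signature")]
--     sigs.append(current_signature)
--     # one forward pass: run = length of the longest strictly-alternating suffix seen so far
--     run = 1
--     prev2 = None
--     prev = sigs[0]
--     for sig in sigs[1:]:
--         if prev2 is not None and sig == prev2 and sig != prev:
--             run += 1
--         elif sig != prev:
--             run = 2
--         else:
--             run = 1
--         prev2, prev = prev, sig
--     if len(sigs) >= 3 and sigs[-1] and sigs[-2] and sigs[-1] != sigs[-2]: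
--         return run
--     return 0
-- ===== Notes on version B (the rewrite author's own statement) =====
-- stated objective: alternative
-- what changed: Replaces A's backward scan with a toggling 'expected' value by a single forward pass that maintains a running alternating-run length (run += 1 when the current signature equals the one two back and differs from the previous, else restart), returning that run only when the last two signatures are distinct, truthy and the list has length >= 3.
import Mathlib
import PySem

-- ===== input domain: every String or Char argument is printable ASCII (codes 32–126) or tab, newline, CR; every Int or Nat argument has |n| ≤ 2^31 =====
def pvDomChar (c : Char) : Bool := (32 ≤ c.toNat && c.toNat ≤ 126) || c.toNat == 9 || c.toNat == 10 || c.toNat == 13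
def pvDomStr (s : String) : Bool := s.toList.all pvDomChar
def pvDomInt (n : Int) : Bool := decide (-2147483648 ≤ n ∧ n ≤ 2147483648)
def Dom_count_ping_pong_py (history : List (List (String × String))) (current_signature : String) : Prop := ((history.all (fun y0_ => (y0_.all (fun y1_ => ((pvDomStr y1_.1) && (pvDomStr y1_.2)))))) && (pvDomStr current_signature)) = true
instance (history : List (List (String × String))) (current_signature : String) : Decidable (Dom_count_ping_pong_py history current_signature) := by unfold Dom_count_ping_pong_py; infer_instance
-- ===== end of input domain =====

-- B replaces A's backward toggling-expected scan by one forward pass keeping a running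
-- alternating-run length; same O(n) cost, different decomposition (objective: alternative).


-- ===== PORT A =====
-- the backward scan 'for sig in reversed(signatures[:-2]): if sig != expected: break; …'
def count_ping_pong_py_loop (a b : String) : List String → String → Int → Int
  | [], _, streak => streak
  | sig :: rest, expected, streak =>
    if sig ≠ expected then streak
    else count_ping_pong_py_loop a b rest (if expected = a then b else a) (streak + 1)

def count_ping_pong_py (history : List (List (String × String))) (current_signature : String) : Int :=
  -- comprehension: kept entries have a present, non-empty signature, so str(v or "") = v
  let signatures := (history.filterMap (fun entry =>
    match (PySem.Dict.mk entry).get? "signature" with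
    | some v => if v = "" then none else some v
    | none => none)) ++ [current_signature]
  if PySem.List.len signatures < 3 then 0
  else
    let a := (PySem.List.pyGet? signatures (-1)).getD ""
    let b := (PySem.List.pyGet? signatures (-2)).getD ""
    if a = "" ∨ b = "" ∨ a = b then 0
    else count_ping_pong_py_loop a b ((PySem.List.slice signatures none (some (-2))).reverse) a 2

-- ===== PORT B =====
-- forward-pass state (run, prev2, prev); prev2/prev are Options, matching Source B's None init
def count_ping_pong_py_alt_step (st : Int × Option String × Option String) (sig : String) :
    Int × Option String × Option String :=
  let run := st.1
  let prev2 := st.2.1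
  let prev := st.2.2
  let run' : Int :=
    if prev2 = some sig ∧ ¬ prev = some sig then run + 1
    else if ¬ prev = some sig then 2
    else 1
  (run', prev, some sig)

def count_ping_pong_py_alt (history : List (List (String × String))) (current_signature : String) : Int :=
  let sigs := (history.filterMap (fun entry =>
    match (PySem.Dict.mk entry).get? "signature" with
    | some v => if v = "" then none else some v
    | none => none)) ++ [current_signature]
  let st := (PySem.List.slice sigs (some 1) none).foldl count_ping_pong_py_alt_step
              (1, none, PySem.List.pyGet? sigs 0)
  if 3 ≤ PySem.List.len sigs ∧ ¬ (PySem.List.pyGet? sigs (-1)).getD "" = ""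
       ∧ ¬ (PySem.List.pyGet? sigs (-2)).getD "" = ""
       ∧ ¬ (PySem.List.pyGet? sigs (-1)).getD "" = (PySem.List.pyGet? sigs (-2)).getD ""
  then st.1 else 0

-- ===== PRECONDITION & SPEC =====
def Spec_count_ping_pong_py (history : List (List (String × String))) (current_signature : String) (out : Int) : Prop := out = count_ping_pong_py_alt history current_signature
instance (history : List (List (String × String))) (current_signature : String) (out : Int) : Decidable (Spec_count_ping_pong_py history current_signature out) := by unfold Spec_count_ping_pong_py; infer_instance

-- ===== CLAIM (what is proved, stated in full; the proofs are below) =====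
def Claim_equal_count_ping_pong_py : Prop := ∀ (history : List (List (String × String))) (current_signature : String), Dom_count_ping_pong_py history current_signature → Spec_count_ping_pong_py history current_signature (count_ping_pong_py history current_signature)

-- ===== LEMMAS AND PROOFS =====

-- length of the maximal prefix matching the alternating pattern x, y, x, y, …
def tailCount (x y : String) : List String → Int
  | [] => 0
  | c :: rest => if c = x then 1 + tailCount y x rest else 0

-- B's running value, read off the REVERSED signatures list
def runRev : List String → Int
  | a :: b :: rest => if a = b then 1 else 2 + tailCount a b rest
  | _ => 1

lemma loop_eq (a b : String) (hab : ¬ a = b) : ∀ (l : List String) (streak : Int),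
    count_ping_pong_py_loop a b l a streak = streak + tailCount a b l
  ∧ count_ping_pong_py_loop a b l b streak = streak + tailCount b a l := by
  intro l
  induction l with
  | nil => intro streak; simp [count_ping_pong_py_loop, tailCount]
  | cons c rest ih =>
    intro streak
    constructor
    · simp only [count_ping_pong_py_loop, tailCount]
      by_cases hca : c = a
      · simp [hca, (ih (streak+1)).2]; ring
      · simp [hca]
    · simp only [count_ping_pong_py_loop, tailCount]
      by_cases hcb : c = b
      · have hba : ¬ b = a := fun h => hab h.symm
        simp [hcb, hba, (ih (streak+1)).1]; ring
      · simp [hcb]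

lemma fold_state (s : List String) :
    (PySem.List.slice s (some 1) none).foldl count_ping_pong_py_alt_step
        (1, none, PySem.List.pyGet? s 0)
      = (runRev s.reverse, s.reverse.tail.head?, s.reverse.head?) := by
  rw [PySem.List.slice_from_one]
  induction s using List.reverseRecOn with
  | nil => simp [runRev, PySem.List.pyGet?, PySem.List.pyIdx?]
  | append_singleton t x ih =>
    rcases t with _ | ⟨h, t'⟩
    · simp [runRev, PySem.List.pyGet?, PySem.List.pyIdx?]
    · have htail : (h :: t' ++ [x]).tail = (h :: t').tail ++ [x] := by simp
      have hget : PySem.List.pyGet? (h :: t' ++ [x]) 0 = PySem.List.pyGet? (h :: t') 0 := by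
        simp [PySem.List.pyGet?_zero]
      rw [htail, List.foldl_append, hget, ih]
      rcases hr : (h :: t').reverse with _ | ⟨p, rest⟩
      · exact absurd hr (by simp)
      · simp only [List.foldl_cons, List.foldl_nil, List.reverse_append, List.reverse_cons,
          hr, List.head?_cons, List.tail_cons]
        simp only [count_ping_pong_py_alt_step]
        rcases rest with _ | ⟨q, r2⟩
        · by_cases hxp : p = x
          · simp [runRev, hxp]
          · have hpx : ¬ x = p := fun h => hxp h.symm
            simp [runRev, tailCount, hxp, hpx]
        · by_cases hxp : p = x
          · subst hxp; simp [runRev]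
          · by_cases hqx : q = x
            · subst hqx
              have hqp : ¬ q = p := fun h => hxp h.symm
              simp [runRev, tailCount, hxp, hqp]
              ring
            · have hpx : ¬ x = p := fun h => hxp h.symm
              have hxq : ¬ x = q := fun h => hqx h.symm
              simp [runRev, tailCount, hxp, hpx, hqx]

lemma key (s : List String) :
    (if PySem.List.len s < 3 then (0:Int) else
      let a := (PySem.List.pyGet? s (-1)).getD ""
      let b := (PySem.List.pyGet? s (-2)).getD ""
      if a = "" ∨ b = "" ∨ a = b then 0
      else count_ping_pong_py_loop a b ((PySem.List.slice s none (some (-2))).reverse) a 2)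
    = (let st := (PySem.List.slice s (some 1) none).foldl count_ping_pong_py_alt_step
          (1, none, PySem.List.pyGet? s 0)
       if 3 ≤ PySem.List.len s ∧ ¬ (PySem.List.pyGet? s (-1)).getD "" = ""
            ∧ ¬ (PySem.List.pyGet? s (-2)).getD "" = ""
            ∧ ¬ (PySem.List.pyGet? s (-1)).getD "" = (PySem.List.pyGet? s (-2)).getD ""
       then st.1 else 0) := by
  rw [fold_state s]
  rcases hrev : s.reverse with _ | ⟨a, _ | ⟨b, rest⟩⟩
  · have hs : s = [] := by simpa using congrArg List.reverse hrev
    subst hs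
    simp [PySem.List.len]
  · have hs : s = [a] := by simpa using congrArg List.reverse hrev
    subst hs
    simp [PySem.List.len]
  · have hs : s = rest.reverse ++ [b, a] := by
      have h := congrArg List.reverse hrev
      simp at h
      simpa using h
    have hlen : s.length = rest.length + 2 := by simp [hs]
    have hga : PySem.List.pyGet? s (-1) = some a := by
      rw [PySem.List.pyGet?_neg_one, List.getLast?_eq_head?_reverse, hrev]; rfl
    have hgb : PySem.List.pyGet? s (-2) = some b := by
      rw [PySem.List.pyGet?_neg_ofNat s 2 (by omega) (by omega), hs]
      have hl2 : (rest.reverse ++ [b, a]).length - 2 = rest.reverse.length := by simp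
      rw [hl2, List.getElem?_append_right (le_refl _)]
      simp
    have hsl : (PySem.List.slice s none (some (-2))).reverse = rest := by
      rw [PySem.List.slice_to_neg_ofNat s 2 (by omega), hlen]
      have : (rest.reverse ++ [b, a]).take rest.length = rest.reverse := by
        rw [List.take_left' (by simp)]
      simp only [hs]
      rw [show rest.length + 2 - 2 = rest.length by omega, this, List.reverse_reverse]
    rw [hga, hgb, hsl, PySem.List.len_eq, hlen]
    rcases rest with _ | ⟨c, rest'⟩
    · rw [if_pos (by norm_num), if_neg (by norm_num)]
    · rw [if_neg (by push_cast [List.length_cons]; omega)]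
      simp only [Option.getD_some]
      by_cases hc : a = "" ∨ b = "" ∨ a = b
      · rw [if_pos hc, if_neg (by tauto)]
      · push Not at hc
        obtain ⟨ha, hb, hab⟩ := hc
        rw [if_neg (by tauto), if_pos ⟨by push_cast [List.length_cons]; omega, ha, hb, hab⟩]
        rw [(loop_eq a b hab (c :: rest') 2).1]
        simp [runRev, hab]

-- ===== VERDICT (by name: the statement is the Claim_ definition above) =====
theorem count_ping_pong_py_spec : Claim_equal_count_ping_pong_py := by
  intro history current_signature _
  unfold Spec_count_ping_pong_py count_ping_pong_py count_ping_pong_py_alt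
  exact key _
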